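-- pv_equiv track=rewrite | github.com/varma59/Examcodes | coprimeCount.py | coprimeCount
-- ===== SOURCE A (Python) =====
-- from math import gcd
--
-- def coprimeCount(A):
--     def is_coprime(a, b):
--         return gcd(a, b) == 1
--
--     B = []
--     for a in A:
--         count = sum(1 for i in range(1, a) if is_coprime(a, i))
--         B.append(count)
--
--     return B
-- ===== SOURCE B (Python) =====
-- def coprimeCount(A):
--     # Euler's totient by trial division up to sqrt(a); a <= 1 has an empty range, count 0.
--     B = []
--     for a in A:
--         if a <= 1:
--             B.append(0)
--             continue
--         n = a
--         r = a
--         p = 2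
--         while p * p <= n:
--             if n % p == 0:
--                 while n % p == 0:
--                     n //= p
--                 r -= r // p
--             p += 1
--         if n > 1:
--             r -= r // n
--         B.append(r)
--     return B
-- ===== Notes on version B (the rewrite author's own statement) =====
-- stated objective: faster
-- what changed: Replaces the per-element scan of all i in 1..a-1 with gcd tests by computing Euler's totient via trial-division prime factorization up to sqrt(a) (a<=1 gives 0, matching the empty range).
import Mathlib
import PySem

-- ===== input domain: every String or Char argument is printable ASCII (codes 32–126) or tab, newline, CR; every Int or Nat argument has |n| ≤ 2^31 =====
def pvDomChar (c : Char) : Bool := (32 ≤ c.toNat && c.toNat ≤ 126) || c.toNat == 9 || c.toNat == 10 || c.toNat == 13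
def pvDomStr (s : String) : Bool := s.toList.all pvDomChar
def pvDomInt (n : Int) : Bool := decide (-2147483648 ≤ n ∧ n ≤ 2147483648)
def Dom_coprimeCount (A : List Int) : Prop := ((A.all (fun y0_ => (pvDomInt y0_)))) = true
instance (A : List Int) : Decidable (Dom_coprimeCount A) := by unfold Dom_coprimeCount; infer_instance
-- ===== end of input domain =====

-- B replaces A's per-element scan of 1..a-1 with gcd tests by Euler's totient via
-- trial-division factorization up to sqrt(a) (objective: faster).

-- ===== PORT A =====
-- is_coprime(a, b): return gcd(a, b) == 1   (math.gcd = Int.gcd, exact)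
def pvIsCoprime (a b : Int) : Bool := Int.gcd a b == 1

def coprimeCount (A : List Int) : List Int :=
  A.foldl (fun B a =>
    B ++ [(PySem.List.pyRange 1 a 1).foldl
            (fun count i => if pvIsCoprime a i then count + 1 else count) 0]) []

-- ===== PORT B =====
-- inner 'while n % p == 0: n //= p'.  B only reaches this with n ≥ 1 and p ≥ 2, where
-- Python's % and // on nonnegative ints coincide with Nat.mod / Nat.div (exact); the
-- 0 < n ∧ 2 ≤ p guard only makes the same computation total.
def stripFac (n p : Nat) : Nat :=
  if h : 2 ≤ p ∧ 0 < n ∧ n % p = 0 then stripFac (n / p) p else n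
termination_by n
decreasing_by exact Nat.div_lt_self h.2.1 (by omega)

theorem stripFac_le (n p : Nat) : stripFac n p ≤ n := by
  induction n using Nat.strong_induction_on with
  | _ n ih =>
    rw [stripFac]
    split
    next h => exact le_trans (ih (n / p) (Nat.div_lt_self h.2.1 (by omega))) (Nat.div_le_self _ _)
    next => exact le_rfl

-- outer 'while p*p <= n' loop of B; r -= r//p after stripping; trailing prime factor.
def phiLoop (n r p : Nat) : Nat :=
  if h : 2 ≤ p ∧ p * p ≤ n then
    if n % p = 0 then
      phiLoop (stripFac n p) (r - r / p) (p + 1)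
    else
      phiLoop n r (p + 1)
  else
    if 1 < n then r - r / n else r
termination_by n + 1 - p
decreasing_by
  · have h1 := stripFac_le n p
    have h2 : p ≤ p * p := Nat.le_mul_of_pos_left p (by omega)
    omega
  · have h2 : p ≤ p * p := Nat.le_mul_of_pos_left p (by omega)
    omega

def coprimeCount_alt (A : List Int) : List Int :=
  A.foldl (fun B a =>
    if a ≤ 1 then B ++ [0]
    else B ++ [(phiLoop a.toNat a.toNat 2 : Int)]) []

-- ===== PRECONDITION & SPEC =====
def Spec_coprimeCount (A : List Int) (out : List Int) : Prop := out = coprimeCount_alt A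
instance (A : List Int) (out : List Int) : Decidable (Spec_coprimeCount A out) := by unfold Spec_coprimeCount; infer_instance

-- ===== CLAIM (what is proved, stated in full; the proofs are below) =====
def Claim_equal_coprimeCount : Prop := ∀ (A : List Int), Dom_coprimeCount A → Spec_coprimeCount A (coprimeCount A)

-- ===== LEMMAS AND PROOFS =====

theorem totient_countP (n : Nat) :
    Nat.totient n = (List.range n).countP (fun k => Nat.gcd n k == 1) := by
  simp [Nat.totient, Finset.filter, Finset.range, Multiset.range, Multiset.filter, Finset.card,
        List.countP_eq_length_filter, Nat.Coprime]
  congr 1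

-- A's inner count equals the totient for a ≥ 2
theorem countA_eq_totient (a : Int) (ha : 2 ≤ a) :
    (PySem.List.pyRange 1 a 1).foldl
      (fun count i => if pvIsCoprime a i then count + 1 else count) 0
      = (Nat.totient a.toNat : Int) := by
  rw [PySem.List.foldl_if_add_one, totient_countP]
  have hna : a = ((a.toNat : Nat) : Int) := (Int.toNat_of_nonneg (by omega)).symm
  obtain ⟨m, hm⟩ : ∃ m, a.toNat = m + 1 := ⟨a.toNat - 1, by omega⟩
  have hmt : (a - 1).toNat = m := by omega
  rw [PySem.List.pyRange_one, hmt, List.countP_map, hm, List.range_succ_eq_map,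
      List.countP_cons, List.countP_map]
  have h0 : (Nat.gcd (m + 1) 0 == 1) = false := by
    rw [Nat.gcd_zero_right]
    simp only [beq_eq_false_iff_ne]
    omega
  rw [h0]
  simp
  have : ∀ k : Nat, ((fun i => pvIsCoprime a i) ∘ (fun k : Nat => (1 : Int) + ↑k)) k
       = ((fun k => Nat.gcd (m + 1) k == 1) ∘ Nat.succ) k := by
    intro k
    simp only [Function.comp, pvIsCoprime]
    have h1 : (1 : Int) + (k : Int) = ((k + 1 : Nat) : Int) := by push_cast; ring
    rw [h1, hna, hm, Int.gcd_natCast_natCast]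
  exact List.countP_congr (fun k _ => by rw [this k])

theorem strip_spec (p : Nat) (hp : 2 ≤ p) (n : Nat) (hn : 0 < n) :
    ∃ k, n = p ^ k * stripFac n p ∧ ¬ p ∣ stripFac n p ∧ 0 < stripFac n p := by
  induction n using Nat.strong_induction_on with
  | _ n ih =>
    rw [stripFac]
    split
    next h =>
      have hdvd : p ∣ n := Nat.dvd_of_mod_eq_zero h.2.2
      have hlt : n / p < n := Nat.div_lt_self h.2.1 (by omega)
      have hpos : 0 < n / p := Nat.div_pos (Nat.le_of_dvd h.2.1 hdvd) (by omega)
      obtain ⟨k, hk1, hk2, hk3⟩ := ih (n / p) hlt hpos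
      refine ⟨k + 1, ?_, hk2, hk3⟩
      have : n = p * (n / p) := (Nat.mul_div_cancel' hdvd).symm
      rw [pow_succ]
      calc n = p * (n / p) := this
        _ = p * (p ^ k * stripFac (n / p) p) := by rw [← hk1]
        _ = p ^ k * p * stripFac (n / p) p := by ring
    next h =>
      refine ⟨0, by simp, ?_, hn⟩
      intro hd
      exact h ⟨hp, hn, Nat.eq_zero_of_dvd_of_lt hd |> fun _ => Nat.mod_eq_zero_of_dvd hd⟩

theorem phiLoop_term (m n r p : Nat) (hn : 0 < n) (hp : 2 ≤ p)
    (hps : n < p * p) (hcop : Nat.Coprime m n) (hr : r = m.totient * n)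
    (hnf : ∀ q, 2 ≤ q → q < p → ¬ q ∣ n) :
    (if 1 < n then r - r / n else r) = (m * n).totient := by
  by_cases h1 : 1 < n
  · rw [if_pos h1]
    have hprime : n.Prime := by
      rw [Nat.prime_def_le_sqrt]
      refine ⟨by omega, fun q hq hle => ?_⟩
      have hqq : q * q ≤ n := Nat.le_sqrt.mp hle
      have hqp : q < p := by
        by_contra hc
        have hc2 : p ≤ q := Nat.le_of_not_lt hc
        have := Nat.mul_le_mul hc2 hc2
        omega
      exact hnf q hq hqp
    have hdiv : r / n = m.totient := by rw [hr, Nat.mul_div_cancel _ (by omega)]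
    rw [hdiv, hr, Nat.totient_mul hcop, Nat.totient_prime hprime, Nat.mul_sub, Nat.mul_one]
  · have hn1 : n = 1 := by omega
    subst hn1
    rw [if_neg h1, hr]
    simp

theorem phiLoop_eq (fuel : Nat) : ∀ m n r p, n + 1 - p ≤ fuel → 0 < n → 2 ≤ p →
    Nat.Coprime m n → r = m.totient * n → (∀ q, 2 ≤ q → q < p → ¬ q ∣ n) →
    phiLoop n r p = (m * n).totient := by
  induction fuel with
  | zero =>
    intro m n r p hfuel hn hp hcop hr hnf
    have hps : ¬ (p * p ≤ n) := by
      intro hc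
      have : p ≤ p * p := Nat.le_mul_of_pos_left p (by omega)
      omega
    rw [phiLoop, dif_neg (by tauto)]
    exact phiLoop_term m n r p hn hp (by omega) hcop hr hnf
  | succ fuel ih =>
    intro m n r p hfuel hn hp hcop hr hnf
    rw [phiLoop]
    by_cases hps : p * p ≤ n
    · rw [dif_pos ⟨hp, hps⟩]
      have hpn : p ≤ n := le_trans (Nat.le_mul_of_pos_left p (by omega)) hps
      by_cases hd : n % p = 0
      · rw [if_pos hd]
        have hdvd : p ∣ n := Nat.dvd_of_mod_eq_zero hd
        -- p is prime: any smaller divisor ≥ 2 would divide n, contradicting hnf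
        have hprime : p.Prime := by
          rw [Nat.prime_def_lt]
          refine ⟨hp, fun q hq hqd => ?_⟩
          by_contra hq1
          have hq2 : 2 ≤ q := by
            rcases Nat.eq_zero_or_pos q with h0 | h0
            · subst h0; have := Nat.eq_zero_of_zero_dvd hqd; omega
            · omega
          exact hnf q hq2 hq (hqd.trans hdvd)
        obtain ⟨k, hk, hks, hspos⟩ := strip_spec p hp n hn
        set s := stripFac n p with hs
        have hk1 : 1 ≤ k := by
          by_contra hc
          have : k = 0 := by omega
          rw [this, pow_zero, one_mul] at hk
          exact hks (hk ▸ hdvd)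
        -- r = t * p with t = m.totient * p^(k-1) * s
        have hpk : p ^ k = p ^ (k - 1) * p := by
          conv_lhs => rw [show k = (k - 1) + 1 by omega]
          rw [pow_succ]
        have hrt : r = (m.totient * p ^ (k - 1) * s) * p := by
          rw [hr, hk, hpk]; ring
        have hrdiv : r / p = m.totient * p ^ (k - 1) * s := by
          rw [hrt, Nat.mul_div_cancel _ (by omega)]
        have hcop_pk : Nat.Coprime m (p ^ k) := Nat.Coprime.coprime_dvd_right ⟨s, hk⟩ hcop
        have hcop_ms : Nat.Coprime m s := Nat.Coprime.coprime_dvd_right ⟨p ^ k, by rw [hk]; ring⟩ hcop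
        have hcop_ps : Nat.Coprime (p ^ k) s :=
          Nat.Coprime.pow_left k ((Nat.Prime.coprime_iff_not_dvd hprime).mpr hks)
        have hr' : r - r / p = (m * p ^ k).totient * s := by
          rw [hrdiv, hrt, Nat.totient_mul hcop_pk, Nat.totient_prime_pow hprime (by omega)]
          have h2 : m.totient * p ^ (k - 1) * s * p - m.totient * p ^ (k - 1) * s
              = m.totient * p ^ (k - 1) * s * (p - 1) := by
            rw [Nat.mul_sub, Nat.mul_one]
          rw [h2]; ring
        have hnf' : ∀ q, 2 ≤ q → q < p + 1 → ¬ q ∣ s := by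
          intro q hq2 hqp hqd
          rcases Nat.lt_or_ge q p with hlt | hge
          · exact hnf q hq2 hlt (hqd.trans ⟨p ^ k, by rw [hk]; ring⟩)
          · have : q = p := by omega
            exact hks (this ▸ hqd)
        have hres := ih (m * p ^ k) s (r - r / p) (p + 1)
          (by have := stripFac_le n p; omega) hspos (by omega)
          (Nat.Coprime.mul_left hcop_ms hcop_ps) hr' hnf'
        rw [hres, hk]
        ring_nf
      · rw [if_neg hd]
        exact ih m n r (p + 1) (by omega) hn (by omega) hcop hr
          (fun q hq2 hqp hqd => by
            rcases Nat.lt_or_ge q p with hlt | hge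
            · exact hnf q hq2 hlt hqd
            · have : q = p := by omega
              exact hd (Nat.mod_eq_zero_of_dvd (this ▸ hqd)))
    · rw [dif_neg (by tauto)]
      exact phiLoop_term m n r p hn hp (by omega) hcop hr hnf

theorem phi_main (n : Nat) (hn : 2 ≤ n) : phiLoop n n 2 = Nat.totient n := by
  have := phiLoop_eq (n + 1) 1 n n 2 (by omega) (by omega) (by omega)
    (Nat.coprime_one_left n) (by simp [Nat.totient_one]) (by omega)
  simpa using this

theorem foldlA (A : List Int) (acc : List Int) :
    A.foldl (fun B a =>
      B ++ [(PySem.List.pyRange 1 a 1).foldl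
              (fun count i => if pvIsCoprime a i then count + 1 else count) 0]) acc
    = acc ++ A.map (fun a => (PySem.List.pyRange 1 a 1).foldl
              (fun count i => if pvIsCoprime a i then count + 1 else count) 0) := by
  induction A generalizing acc with
  | nil => simp
  | cons x xs ih => simp [List.foldl_cons, ih]

theorem foldlB (A : List Int) (acc : List Int) :
    A.foldl (fun B a =>
      if a ≤ 1 then B ++ [0] else B ++ [(phiLoop a.toNat a.toNat 2 : Int)]) acc
    = acc ++ A.map (fun a => if a ≤ 1 then (0 : Int) else (phiLoop a.toNat a.toNat 2 : Int)) := by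
  induction A generalizing acc with
  | nil => simp
  | cons x xs ih =>
      by_cases h : x ≤ 1 <;> simp [List.foldl_cons, h, ih]

theorem pointwise (a : Int) :
    (PySem.List.pyRange 1 a 1).foldl
      (fun count i => if pvIsCoprime a i then count + 1 else count) 0
    = if a ≤ 1 then (0 : Int) else (phiLoop a.toNat a.toNat 2 : Int) := by
  by_cases h : a ≤ 1
  · simp [h, PySem.List.pyRange_one_eq_nil h]
  · have ha : 2 ≤ a := by omega
    rw [if_neg h, countA_eq_totient a ha, phi_main a.toNat (by omega)]

-- ===== VERDICT (by name: the statement is the Claim_ definition above) =====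
theorem coprimeCount_spec : Claim_equal_coprimeCount := by
  intro A _
  show coprimeCount A = coprimeCount_alt A
  unfold coprimeCount coprimeCount_alt
  rw [foldlA, foldlB]
  simp only [List.nil_append]
  exact List.map_congr_left (fun a _ => pointwise a)
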